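-- pv_equiv track=rewrite | github.com/sungminoh/algorithms | leetcode/solved/927_Sum_of_Subsequence_Widths/solution.py | sumSubseqWidths
-- ===== SOURCE A (Python) =====
-- from typing import List
--
-- def sumSubseqWidths(nums: List[int]) -> int:
--     """Sub Array case"""
--     N = len(nums)
--     mn = 0
--     mx = 0
--     increasing = []
--     decreasing = []
--     for i, n in enumerate(nums):
--         while increasing and nums[increasing[-1]] >= n:
--             j = increasing.pop()
--             mn += (i-j) * (j - (increasing[-1] if increasing else -1)) * nums[j]  # min
--         increasing.append(i)
--
--         while decreasing and nums[decreasing [-1]] <= n: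
--             j = decreasing.pop()
--             mx += (i-j) * (j - (decreasing[-1] if decreasing else -1)) * nums[j]  # max
--         decreasing.append(i)
--
--     while increasing:
--         j = increasing.pop()
--         mn += (N-j) * (j - (increasing[-1] if increasing else -1)) * nums[j]  # min
--     while decreasing:
--         j = decreasing.pop()
--         mx += (N-j) * (j - (decreasing[-1] if decreasing else -1)) * nums[j]  # max
--
--     MOD = int(1e9+7)
--     return (mx-mn) % MOD
-- ===== SOURCE B (Python) =====
-- def sumSubseqWidths(nums):
--     N = len(nums)
--     acc = 0
--     for i in range(N):
--         mx = mn = nums[i]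
--         for j in range(i + 1, N):
--             mx = max(mx, nums[j])
--             mn = min(mn, nums[j])
--             acc += mx - mn
--     return acc % (10 ** 9 + 7)
-- ===== Notes on version B (the rewrite author's own statement) =====
-- stated objective: simpler
-- what changed: Replaced the two monotonic stacks (with pop-time span accounting and a final flush) by a direct double loop that keeps a running max/min per start index and sums their differences.
import Mathlib
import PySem

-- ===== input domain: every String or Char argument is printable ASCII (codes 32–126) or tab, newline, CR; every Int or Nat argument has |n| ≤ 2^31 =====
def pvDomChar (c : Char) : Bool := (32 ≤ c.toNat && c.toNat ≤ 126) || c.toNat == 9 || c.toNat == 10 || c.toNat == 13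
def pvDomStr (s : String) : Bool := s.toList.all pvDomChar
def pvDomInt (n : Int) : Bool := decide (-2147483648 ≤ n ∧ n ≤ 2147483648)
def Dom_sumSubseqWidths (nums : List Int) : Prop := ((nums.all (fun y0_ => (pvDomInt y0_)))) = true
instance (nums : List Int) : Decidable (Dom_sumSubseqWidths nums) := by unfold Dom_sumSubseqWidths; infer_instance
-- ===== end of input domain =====

-- B replaces A's two monotonic stacks by a plain double loop with a running max/min per
-- start index (simpler, same exact result; O(n^2) instead of A's O(n)).

-- ===== PORT A =====
-- 'increasing[-1] if increasing else -1' (stack head = Python's last element)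
def pvPrev (st : List Int) : Int :=
  match st with
  | [] => -1
  | p :: _ => p

-- the 'while increasing and nums[increasing[-1]] >= n' pop loop (index always in range,
-- so pyGetD's default branch is dead)
def pvPopMin (nums : List Int) (i n : Int) : Int → List Int → Int × List Int
  | mn, [] => (mn, [])
  | mn, j :: rest =>
    if PySem.List.pyGetD nums j 0 ≥ n then
      pvPopMin nums i n (mn + (i - j) * (j - pvPrev rest) * PySem.List.pyGetD nums j 0) rest
    else (mn, j :: rest)

-- the 'while decreasing and nums[decreasing[-1]] <= n' pop loop
def pvPopMax (nums : List Int) (i n : Int) : Int → List Int → Int × List Int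
  | mx, [] => (mx, [])
  | mx, j :: rest =>
    if PySem.List.pyGetD nums j 0 ≤ n then
      pvPopMax nums i n (mx + (i - j) * (j - pvPrev rest) * PySem.List.pyGetD nums j 0) rest
    else (mx, j :: rest)

-- the final 'while increasing:' drain
def pvFlushMin (nums : List Int) (N : Int) : Int → List Int → Int
  | mn, [] => mn
  | mn, j :: rest =>
      pvFlushMin nums N (mn + (N - j) * (j - pvPrev rest) * PySem.List.pyGetD nums j 0) rest

-- the final 'while decreasing:' drain
def pvFlushMax (nums : List Int) (N : Int) : Int → List Int → Int
  | mx, [] => mx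
  | mx, j :: rest =>
      pvFlushMax nums N (mx + (N - j) * (j - pvPrev rest) * PySem.List.pyGetD nums j 0) rest

def sumSubseqWidths (nums : List Int) : Int :=
  let N := PySem.List.len nums
  let s :=
    (PySem.List.enumerate nums 0).foldl
      (fun (s : Int × Int × List Int × List Int) (p : Int × Int) =>
        ((pvPopMin nums p.1 p.2 s.1 s.2.2.1).1,
         (pvPopMax nums p.1 p.2 s.2.1 s.2.2.2).1,
         p.1 :: (pvPopMin nums p.1 p.2 s.1 s.2.2.1).2,
         p.1 :: (pvPopMax nums p.1 p.2 s.2.1 s.2.2.2).2))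
      (0, 0, [], [])
  let mn := pvFlushMin nums N s.1 s.2.2.1
  let mx := pvFlushMax nums N s.2.1 s.2.2.2
  PySem.Int.mod (mx - mn) 1000000007  -- MOD = int(1e9+7) = 1000000007

-- ===== PORT B =====
def sumSubseqWidths_alt (nums : List Int) : Int :=
  let N := PySem.List.len nums
  let acc :=
    (PySem.List.pyRange 0 N 1).foldl
      (fun (acc : Int) (i : Int) =>
        ((PySem.List.pyRange (i + 1) N 1).foldl
          (fun (s : Int × Int × Int) (j : Int) =>
            let mx := max s.1 (PySem.List.pyGetD nums j 0)
            let mn := min s.2.1 (PySem.List.pyGetD nums j 0)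
            (mx, mn, s.2.2 + (mx - mn)))
          (PySem.List.pyGetD nums i 0, PySem.List.pyGetD nums i 0, acc)).2.2)
      0
  PySem.Int.mod acc (10 ^ 9 + 7)

-- ===== PRECONDITION & SPEC =====
def Spec_sumSubseqWidths (nums : List Int) (out : Int) : Prop := out = sumSubseqWidths_alt nums
instance (nums : List Int) (out : Int) : Decidable (Spec_sumSubseqWidths nums out) := by unfold Spec_sumSubseqWidths; infer_instance

-- ===== CLAIM (what is proved, stated in full; the proofs are below) =====
def Claim_equal_sumSubseqWidths : Prop := ∀ (nums : List Int), Dom_sumSubseqWidths nums → Spec_sumSubseqWidths nums (sumSubseqWidths nums)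


-- ===== LEMMAS AND PROOFS =====

-- Generic "value function" view of A's machine: v t abstracts nums[t].
def pvV (nums : List Int) (t : Int) : Int := PySem.List.pyGetD nums t 0

def vPop (v : Int → Int) (i n : Int) : Int → List Int → Int × List Int
  | mn, [] => (mn, [])
  | mn, j :: rest =>
    if v j ≥ n then vPop v i n (mn + (i - j) * (j - pvPrev rest) * v j) rest
    else (mn, j :: rest)

def vFlush (v : Int → Int) (N : Int) : Int → List Int → Int
  | mn, [] => mn
  | mn, j :: rest => vFlush v N (mn + (N - j) * (j - pvPrev rest) * v j) rest

def pend (v : Int → Int) (k : Int) : List Int → Int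
  | [] => 0
  | j :: rest => (k - j) * (j - pvPrev rest) * v j + pend v k rest

def gaps (v : Int → Int) : List Int → Int
  | [] => 0
  | j :: rest => (j - pvPrev rest) * v j + gaps v rest

def sMinV (v : Int → Int) (l r : Int) : Int :=
  (PySem.List.pyRange (l + 1) (r + 1) 1).foldl (fun a t => min a (v t)) (v l)

def sMaxV (v : Int → Int) (l r : Int) : Int :=
  (PySem.List.pyRange (l + 1) (r + 1) 1).foldl (fun a t => max a (v t)) (v l)

def rowV (v : Int → Int) (r : Int) : Int :=
  ((PySem.List.pyRange 0 (r + 1) 1).map (fun l => sMinV v l r)).sum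

def SV (v : Int → Int) (m : Int) : Int :=
  ((PySem.List.pyRange 0 m 1).map (fun r => rowV v r)).sum

def OKE (v : Int → Int) (k : Int) : List Int → Prop
  | [] => True
  | j :: rest => 0 ≤ j ∧ j < k ∧ pvPrev rest < j ∧
      (∀ t, j < t → t < k → v j < v t) ∧
      (∀ t, pvPrev rest < t → t < j → v j ≤ v t) ∧ OKE v k rest

def vStep (v : Int → Int) (i n : Int) (s : Int × List Int) : Int × List Int :=
  ((vPop v i n s.1 s.2).1, i :: (vPop v i n s.1 s.2).2)

def VInv (v : Int → Int) (m : Nat) (s : Int × List Int) : Prop :=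
  OKE v (m : Int) s.2 ∧ (if m = 0 then s.2 = [] else pvPrev s.2 = (m : Int) - 1) ∧
    s.1 + pend v (m : Int) s.2 = SV v (m : Int)

theorem pvPopMin_eq_vPop (nums : List Int) (i n : Int) :
    ∀ (st : List Int) (mn : Int), pvPopMin nums i n mn st = vPop (pvV nums) i n mn st := by
  intro st
  induction st with
  | nil => intro mn; rfl
  | cons j rest ih =>
    intro mn
    simp only [pvPopMin, vPop, pvV]
    split <;> simp [ih]

theorem pvPopMax_eq_vPop (nums : List Int) (i n : Int) :
    ∀ (st : List Int) (mx : Int),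
      pvPopMax nums i n mx st
        = (-(vPop (fun t => -(pvV nums t)) i (-n) (-mx) st).1,
           (vPop (fun t => -(pvV nums t)) i (-n) (-mx) st).2) := by
  intro st
  induction st with
  | nil => intro mx; simp [pvPopMax, vPop]
  | cons j rest ih =>
    intro mx
    show (if PySem.List.pyGetD nums j 0 ≤ n then _ else _) = _
    have hc : ((fun t => -(pvV nums t)) j ≥ -n) ↔ (PySem.List.pyGetD nums j 0 ≤ n) := by
      simp only [pvV]; omega
    rw [show (vPop (fun t => -(pvV nums t)) i (-n) (-mx) (j :: rest))
          = if (fun t => -(pvV nums t)) j ≥ -n then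
              vPop (fun t => -(pvV nums t)) i (-n)
                (-mx + (i - j) * (j - pvPrev rest) * ((fun t => -(pvV nums t)) j)) rest
            else (-mx, j :: rest) from rfl]
    by_cases h : PySem.List.pyGetD nums j 0 ≤ n
    · rw [if_pos h, if_pos (hc.mpr h), ih]
      have : -mx + (i - j) * (j - pvPrev rest) * ((fun t => -(pvV nums t)) j)
           = -(mx + (i - j) * (j - pvPrev rest) * PySem.List.pyGetD nums j 0) := by
        simp only [pvV]; ring
      rw [this]
    · rw [if_neg h, if_neg (fun hx => h (hc.mp hx))]
      simp

theorem pvFlushMin_eq_vFlush (nums : List Int) (N : Int) :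
    ∀ (st : List Int) (mn : Int), pvFlushMin nums N mn st = vFlush (pvV nums) N mn st := by
  intro st
  induction st with
  | nil => intro mn; rfl
  | cons j rest ih => intro mn; simp only [pvFlushMin, vFlush, pvV]; exact ih _

theorem pvFlushMax_eq_vFlush (nums : List Int) (N : Int) :
    ∀ (st : List Int) (mx : Int),
      pvFlushMax nums N mx st = -(vFlush (fun t => -(pvV nums t)) N (-mx) st) := by
  intro st
  induction st with
  | nil => intro mx; simp [pvFlushMax, vFlush]
  | cons j rest ih =>
    intro mx
    show pvFlushMax nums N (mx + (N - j) * (j - pvPrev rest) * PySem.List.pyGetD nums j 0) rest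
        = -(vFlush (fun t => -(pvV nums t)) N
            (-mx + (N - j) * (j - pvPrev rest) * ((fun t => -(pvV nums t)) j)) rest)
    rw [ih]
    have : -mx + (N - j) * (j - pvPrev rest) * ((fun t => -(pvV nums t)) j)
         = -(mx + (N - j) * (j - pvPrev rest) * PySem.List.pyGetD nums j 0) := by
      simp only [pvV]; ring
    rw [this]

theorem vFlush_pend (v : Int → Int) (N : Int) :
    ∀ (st : List Int) (mn : Int), vFlush v N mn st = mn + pend v N st := by
  intro st
  induction st with
  | nil => intro mn; simp [vFlush, pend]
  | cons j rest ih => intro mn; simp only [vFlush, pend]; rw [ih]; ring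

theorem pend_succ (v : Int → Int) (k : Int) :
    ∀ (st : List Int), pend v (k + 1) st = pend v k st + gaps v st := by
  intro st
  induction st with
  | nil => simp [pend, gaps]
  | cons j rest ih => simp only [pend, gaps]; rw [ih]; ring

theorem foldl_min_le (v : Int → Int) :
    ∀ (l : List Int) (a : Int), l.foldl (fun a t => min a (v t)) a ≤ a := by
  intro l
  induction l with
  | nil => intro a; simp
  | cons x l ih =>
    intro a
    calc (x :: l).foldl (fun a t => min a (v t)) a
        = l.foldl (fun a t => min a (v t)) (min a (v x)) := rfl
      _ ≤ min a (v x) := ih _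
      _ ≤ a := min_le_left _ _

theorem foldl_min_le_mem (v : Int → Int) :
    ∀ (l : List Int) (a t : Int), t ∈ l → l.foldl (fun a t => min a (v t)) a ≤ v t := by
  intro l
  induction l with
  | nil => intro a t h; simp at h
  | cons x l ih =>
    intro a t h
    rcases List.mem_cons.mp h with h | h
    · subst h
      calc (t :: l).foldl (fun a t => min a (v t)) a
          = l.foldl (fun a t => min a (v t)) (min a (v t)) := rfl
        _ ≤ min a (v t) := foldl_min_le v l _
        _ ≤ v t := min_le_right _ _
    · exact ih _ t h

theorem le_foldl_min (v : Int → Int) :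
    ∀ (l : List Int) (a c : Int), c ≤ a → (∀ t ∈ l, c ≤ v t) →
      c ≤ l.foldl (fun a t => min a (v t)) a := by
  intro l
  induction l with
  | nil => intro a c h _; simpa using h
  | cons x l ih =>
    intro a c h hl
    exact ih _ c (le_min h (hl x List.mem_cons_self)) (fun t ht => hl t (List.mem_cons_of_mem _ ht))

theorem sMinV_self (v : Int → Int) (l : Int) : sMinV v l l = v l := by
  simp [sMinV, PySem.List.pyRange_one_eq_nil (le_refl (l + 1))]

theorem sMaxV_self (v : Int → Int) (l : Int) : sMaxV v l l = v l := by
  simp [sMaxV, PySem.List.pyRange_one_eq_nil (le_refl (l + 1))]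

theorem sMinV_succ (v : Int → Int) {l r : Int} (h : l ≤ r) :
    sMinV v l (r + 1) = min (sMinV v l r) (v (r + 1)) := by
  unfold sMinV
  rw [PySem.List.pyRange_one_succ_right (by omega : l + 1 ≤ r + 1), List.foldl_append]
  rfl

theorem sMaxV_succ (v : Int → Int) {l r : Int} (h : l ≤ r) :
    sMaxV v l (r + 1) = max (sMaxV v l r) (v (r + 1)) := by
  unfold sMaxV
  rw [PySem.List.pyRange_one_succ_right (by omega : l + 1 ≤ r + 1), List.foldl_append]
  rfl

theorem sMinV_eq_of (v : Int → Int) {l r j : Int} (h1 : l ≤ j) (h2 : j ≤ r)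
    (hm : ∀ t, l ≤ t → t ≤ r → v j ≤ v t) : sMinV v l r = v j := by
  apply le_antisymm
  · rcases eq_or_lt_of_le h1 with h | h
    · subst h; exact foldl_min_le v _ _
    · exact foldl_min_le_mem v _ _ j (PySem.List.mem_pyRange_one.mpr ⟨by omega, by omega⟩)
  · exact le_foldl_min v _ _ _ (hm l le_rfl (le_trans h1 h2))
      (fun t ht => by
        have := PySem.List.mem_pyRange_one.mp ht
        exact hm t (by omega) (by omega))

theorem foldl_min_neg (v : Int → Int) :
    ∀ (xs : List Int) (a : Int),
      xs.foldl (fun a t => min a (-(v t))) (-a) = -(xs.foldl (fun a t => max a (v t)) a) := by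
  intro xs
  induction xs with
  | nil => intro a; simp
  | cons x xs ih =>
    intro a
    simp only [List.foldl_cons]
    rw [show min (-a) (-(v x)) = -(max a (v x)) by omega, ih]

theorem sMinV_neg (v : Int → Int) (l r : Int) :
    sMinV (fun t => -(v t)) l r = -(sMaxV v l r) := by
  unfold sMinV sMaxV
  exact foldl_min_neg v _ (v l)


theorem OKE_mem (v : Int → Int) (k : Int) :
    ∀ (st : List Int), OKE v k st → ∀ j ∈ st, 0 ≤ j ∧ j < k := by
  intro st
  induction st with
  | nil => intro _ j hj; simp at hj
  | cons x rest ih =>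
    intro h j hj
    obtain ⟨h0, h1, _, _, _, hr⟩ := h
    rcases List.mem_cons.mp hj with h | h
    · subst h; exact ⟨h0, h1⟩
    · exact ih hr j h

theorem OKE_all_lt_of_top (v : Int → Int) (i n : Int) :
    ∀ (st : List Int), OKE v i st → (st = [] ∨ v (pvPrev st) < n) → ∀ j ∈ st, v j < n := by
  intro st
  induction st with
  | nil => intro _ _ j hj; simp at hj
  | cons x rest ih =>
    intro hOK htop j hj
    obtain ⟨h0, h1, h2, h3, h4, hr⟩ := hOK
    have hx : v x < n := by
      rcases htop with h | h
      · simp at h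
      · simpa [pvPrev] using h
    rcases List.mem_cons.mp hj with h | h
    · subst h; exact hx
    · refine ih hr ?_ j h
      cases rest with
      | nil => exact Or.inl rfl
      | cons p rest' =>
        refine Or.inr ?_
        have hp : p < x := by simpa [pvPrev] using h2
        have : v p < v x := by
          obtain ⟨_, _, _, hafter, _, _⟩ := hr
          exact hafter x hp h1
        simpa [pvPrev] using lt_trans this hx

theorem vPop_spec (v : Int → Int) (i n : Int) :
    ∀ (st : List Int) (mn : Int), OKE v i st →
      (∀ t, pvPrev st < t → t < i → n ≤ v t) →
      (vPop v i n mn st).1 + pend v i (vPop v i n mn st).2 = mn + pend v i st ∧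
      OKE v i (vPop v i n mn st).2 ∧
      (∀ t, pvPrev (vPop v i n mn st).2 < t → t < i → n ≤ v t) ∧
      ((vPop v i n mn st).2 = [] ∨ v (pvPrev (vPop v i n mn st).2) < n) := by
  intro st
  induction st with
  | nil =>
    intro mn _ hcov
    exact ⟨rfl, trivial, hcov, Or.inl rfl⟩
  | cons j rest ih =>
    intro mn hOK hcov
    obtain ⟨h0, h1, h2, h3, h4, hr⟩ := hOK
    by_cases h : v j ≥ n
    · have hstep : vPop v i n mn (j :: rest)
          = vPop v i n (mn + (i - j) * (j - pvPrev rest) * v j) rest := by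
        simp [vPop, h]
      rw [hstep]
      have hcov' : ∀ t, pvPrev rest < t → t < i → n ≤ v t := by
        intro t ht1 ht2
        rcases lt_trichotomy t j with hlt | heq | hgt
        · exact le_trans h (h4 t ht1 hlt)
        · subst heq; exact h
        · exact hcov t (by simpa [pvPrev] using hgt) ht2
      obtain ⟨hE, hOK', hC, hT⟩ := ih (mn + (i - j) * (j - pvPrev rest) * v j) hr hcov'
      refine ⟨?_, hOK', hC, hT⟩
      rw [hE, show pend v i (j :: rest) = (i - j) * (j - pvPrev rest) * v j + pend v i rest from rfl]
      ring
    · have hstep : vPop v i n mn (j :: rest) = (mn, j :: rest) := by simp [vPop, h]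
      rw [hstep]
      exact ⟨rfl, ⟨h0, h1, h2, h3, h4, hr⟩, hcov, Or.inr (by simpa [pvPrev] using not_le.mp h)⟩

theorem OKE_succ (v : Int → Int) (i : Int) :
    ∀ (st : List Int), OKE v i st → (∀ j ∈ st, v j < v i) → OKE v (i + 1) st := by
  intro st
  induction st with
  | nil => intro _ _; trivial
  | cons j rest ih =>
    intro hOK hall
    obtain ⟨h0, h1, h2, h3, h4, hr⟩ := hOK
    refine ⟨h0, by omega, h2, ?_, h4, ih hr (fun x hx => hall x (List.mem_cons_of_mem _ hx))⟩
    intro t ht1 ht2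
    rcases lt_or_ge t i with h | h
    · exact h3 t ht1 h
    · have : t = i := by omega
      subst this
      exact hall j List.mem_cons_self

theorem gaps_eq (v : Int → Int) (i : Int) :
    ∀ (st : List Int), OKE v (i + 1) st →
      gaps v st = ((PySem.List.pyRange 0 (pvPrev st + 1) 1).map (fun l => sMinV v l i)).sum := by
  intro st
  induction st with
  | nil =>
    intro _
    simp [gaps, pvPrev]
  | cons j rest ih =>
    intro hOK
    obtain ⟨h0, h1, h2, h3, h4, hr⟩ := hOK
    have hp : -1 ≤ pvPrev rest := by
      cases rest with
      | nil => simp [pvPrev]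
      | cons p rest' =>
        obtain ⟨hp0, _⟩ := hr
        have : pvPrev (p :: rest') = p := rfl
        omega
    have hsplit : PySem.List.pyRange 0 (pvPrev (j :: rest) + 1) 1
        = PySem.List.pyRange 0 (pvPrev rest + 1) 1
          ++ PySem.List.pyRange (pvPrev rest + 1) (j + 1) 1 := by
      simp only [pvPrev]
      exact PySem.List.pyRange_one_append 0 (pvPrev rest + 1) (j + 1) (by omega) (by omega)
    rw [show gaps v (j :: rest) = (j - pvPrev rest) * v j + gaps v rest from rfl, hsplit,
        List.map_append, List.sum_append, ih hr]
    have hconst : (PySem.List.pyRange (pvPrev rest + 1) (j + 1) 1).map (fun l => sMinV v l i)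
        = (PySem.List.pyRange (pvPrev rest + 1) (j + 1) 1).map (fun _ => v j) := by
      apply List.map_congr_left
      intro l hl
      have hlb := PySem.List.mem_pyRange_one.mp hl
      apply sMinV_eq_of v (by omega) (by omega)
      intro t ht1 ht2
      rcases lt_trichotomy t j with hlt | heq | hgt
      · exact h4 t (by omega) hlt
      · subst heq; exact le_rfl
      · exact le_of_lt (h3 t hgt (by omega))
    rw [hconst, PySem.List.sum_map_const_int, PySem.List.length_pyRange_one]
    have : ((j + 1 - (pvPrev rest + 1)).toNat : Int) = j - pvPrev rest := by omega
    rw [this]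
    ring

theorem SV_succ (v : Int → Int) (k : Int) (hk : 0 ≤ k) : SV v (k + 1) = SV v k + rowV v k := by
  unfold SV
  rw [PySem.List.pyRange_one_succ_right hk, List.map_append, List.sum_append]
  simp

theorem vStep_inv (v : Int → Int) (m : Nat) (s : Int × List Int) (h : VInv v m s) :
    VInv v (m + 1) (vStep v (m : Int) (v (m : Int)) s) := by
  obtain ⟨hOK, hTop, hAcc⟩ := h
  have hcov : ∀ t, pvPrev s.2 < t → t < (m : Int) → v (m : Int) ≤ v t := by
    intro t ht1 ht2
    by_cases hm : m = 0
    · subst hm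
      rw [if_pos rfl] at hTop
      rw [hTop] at ht1
      simp [pvPrev] at ht1
      omega
    · rw [if_neg hm] at hTop
      rw [hTop] at ht1
      omega
  obtain ⟨hE, hOK', hC, hT⟩ := vPop_spec v (m : Int) (v (m : Int)) s.2 s.1 hOK hcov
  set q := vPop v (m : Int) (v (m : Int)) s.1 s.2 with hq
  have hprev : pvPrev q.2 < (m : Int) := by
    cases hq2 : q.2 with
    | nil => simp [pvPrev]; omega
    | cons j rest =>
      have := OKE_mem v (m : Int) q.2 hOK' j (by rw [hq2]; exact List.mem_cons_self)
      simp [pvPrev]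
      omega
  have hOKnew : OKE v ((m : Int) + 1) ((m : Int) :: q.2) := by
    refine ⟨by omega, by omega, by simpa [pvPrev] using hprev, ?_, hC, ?_⟩
    · intro t ht1 ht2; omega
    · exact OKE_succ v (m : Int) q.2 hOK' (OKE_all_lt_of_top v (m : Int) (v (m : Int)) q.2 hOK' hT)
  refine ⟨?_, ?_, ?_⟩
  · show OKE v ((m + 1 : Nat) : Int) ((m : Int) :: q.2)
    have : ((m + 1 : Nat) : Int) = (m : Int) + 1 := by push_cast; ring
    rw [this]
    exact hOKnew
  · rw [if_neg (by omega : ¬ m + 1 = 0)]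
    show pvPrev ((m : Int) :: q.2) = ((m + 1 : Nat) : Int) - 1
    simp [pvPrev]
  · show q.1 + pend v ((m + 1 : Nat) : Int) ((m : Int) :: q.2) = SV v ((m + 1 : Nat) : Int)
    have hcast : ((m + 1 : Nat) : Int) = (m : Int) + 1 := by push_cast; ring
    rw [hcast]
    have hgaps : gaps v ((m : Int) :: q.2) = rowV v (m : Int) := by
      rw [gaps_eq v (m : Int) ((m : Int) :: q.2) hOKnew]
      simp [pvPrev, rowV]
    have hpend : pend v ((m : Int) + 1) ((m : Int) :: q.2)
        = pend v (m : Int) ((m : Int) :: q.2) + gaps v ((m : Int) :: q.2) :=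
      pend_succ v (m : Int) _
    have hpc : pend v (m : Int) ((m : Int) :: q.2)
        = ((m : Int) - (m : Int)) * ((m : Int) - pvPrev q.2) * v (m : Int) + pend v (m : Int) q.2 := rfl
    rw [SV_succ v (m : Int) (by omega), ← hAcc, hpend, hpc, hgaps]
    have : ((m : Int) - (m : Int)) * ((m : Int) - pvPrev q.2) * v (m : Int) = 0 := by ring
    rw [this]
    omega


theorem vLoop_inv (v : Int → Int) :
    ∀ (c m : Nat) (s : Int × List Int), VInv v m s →
      VInv v (m + c)
        ((PySem.List.pyRange (m : Int) ((m + c : Nat) : Int) 1).foldl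
          (fun s j => vStep v j (v j) s) s) := by
  intro c
  induction c with
  | zero =>
    intro m s h
    rw [PySem.List.pyRange_one_eq_nil (by omega : ((m + 0 : Nat) : Int) ≤ (m : Int))]
    simpa using h
  | succ c ih =>
    intro m s h
    have hcons : PySem.List.pyRange (m : Int) ((m + (c + 1) : Nat) : Int) 1
        = (m : Int) :: PySem.List.pyRange ((m : Int) + 1) ((m + (c + 1) : Nat) : Int) 1 :=
      PySem.List.pyRange_one_cons (by push_cast; omega)
    rw [hcons, List.foldl_cons]
    have h1 : VInv v (m + 1) (vStep v (m : Int) (v (m : Int)) s) := vStep_inv v m s h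
    have := ih (m + 1) _ h1
    have hc1 : (((m + 1) + c : Nat) : Int) = ((m + (c + 1) : Nat) : Int) := by push_cast; ring
    have hc2 : (((m + 1) : Nat) : Int) = (m : Int) + 1 := by push_cast; ring
    rw [hc1, hc2] at this
    have hc3 : (m + 1) + c = m + (c + 1) := by omega
    rw [hc3] at this
    exact this

def pvMinStep (nums : List Int) (s : Int × List Int) (p : Int × Int) : Int × List Int :=
  ((pvPopMin nums p.1 p.2 s.1 s.2).1, p.1 :: (pvPopMin nums p.1 p.2 s.1 s.2).2)

def pvMaxStep (nums : List Int) (s : Int × List Int) (p : Int × Int) : Int × List Int :=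
  ((pvPopMax nums p.1 p.2 s.1 s.2).1, p.1 :: (pvPopMax nums p.1 p.2 s.1 s.2).2)

theorem fold_split (nums : List Int) :
    ∀ (l : List (Int × Int)) (mn mx : Int) (inc dec : List Int),
      l.foldl
        (fun (s : Int × Int × List Int × List Int) (p : Int × Int) =>
          ((pvPopMin nums p.1 p.2 s.1 s.2.2.1).1,
           (pvPopMax nums p.1 p.2 s.2.1 s.2.2.2).1,
           p.1 :: (pvPopMin nums p.1 p.2 s.1 s.2.2.1).2,
           p.1 :: (pvPopMax nums p.1 p.2 s.2.1 s.2.2.2).2))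
        (mn, mx, inc, dec)
      = ((l.foldl (pvMinStep nums) (mn, inc)).1,
         (l.foldl (pvMaxStep nums) (mx, dec)).1,
         (l.foldl (pvMinStep nums) (mn, inc)).2,
         (l.foldl (pvMaxStep nums) (mx, dec)).2) := by
  intro l
  induction l with
  | nil => intro mn mx inc dec; rfl
  | cons p l ih =>
    intro mn mx inc dec
    simp only [List.foldl_cons]
    rw [ih]
    rfl

theorem minFold_eq_vLoop (nums : List Int) :
    ∀ (l : List (Int × Int)) (s : Int × List Int),
      l.foldl (pvMinStep nums) s = l.foldl (fun s p => vStep (pvV nums) p.1 p.2 s) s := by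
  intro l
  induction l with
  | nil => intro s; rfl
  | cons p l ih =>
    intro s
    simp only [List.foldl_cons]
    rw [show pvMinStep nums s p = vStep (pvV nums) p.1 p.2 s by
      simp [pvMinStep, vStep, pvPopMin_eq_vPop], ih]

theorem maxFold_eq_vLoop (nums : List Int) :
    ∀ (l : List (Int × Int)) (mx : Int) (st : List Int),
      l.foldl (pvMaxStep nums) (mx, st)
        = (-(l.foldl (fun s p => vStep (fun t => -(pvV nums t)) p.1 (-p.2) s) (-mx, st)).1,
           (l.foldl (fun s p => vStep (fun t => -(pvV nums t)) p.1 (-p.2) s) (-mx, st)).2) := by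
  intro l
  induction l with
  | nil => intro mx st; simp
  | cons p l ih =>
    intro mx st
    simp only [List.foldl_cons]
    have hstep : pvMaxStep nums (mx, st) p
        = (-(vStep (fun t => -(pvV nums t)) p.1 (-p.2) (-mx, st)).1,
           (vStep (fun t => -(pvV nums t)) p.1 (-p.2) (-mx, st)).2) := by
      simp only [pvMaxStep, vStep, pvPopMax_eq_vPop]
    rw [hstep]
    have h2 := ih (-(vStep (fun t => -(pvV nums t)) p.1 (-p.2) (-mx, st)).1)
      ((vStep (fun t => -(pvV nums t)) p.1 (-p.2) (-mx, st)).2)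
    rw [h2, neg_neg]

theorem foldl_acc_sum (f : Int → Int → Int) (w : Int → Int) :
    ∀ (l : List Int), (∀ acc x, x ∈ l → f acc x = acc + w x) →
      ∀ acc, l.foldl f acc = acc + (l.map w).sum := by
  intro l
  induction l with
  | nil => intro _ acc; simp
  | cons x l ih =>
    intro h acc
    simp only [List.foldl_cons, List.map_cons, List.sum_cons]
    rw [h acc x List.mem_cons_self, ih (fun a y hy => h a y (List.mem_cons_of_mem _ hy))]
    ring

theorem sum_map_neg_int (l : List Int) (f : Int → Int) :
    (l.map (fun x => -(f x))).sum = -((l.map f).sum) := by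
  induction l with
  | nil => simp
  | cons x l ih => simp [ih]; ring

theorem sum_map_sub_int (l : List Int) (f g : Int → Int) :
    (l.map (fun x => f x - g x)).sum = (l.map f).sum - (l.map g).sum := by
  induction l with
  | nil => simp
  | cons x l ih => simp [ih]; ring

theorem exch (w : Int → Int → Int) :
    ∀ (N : Nat),
      ((PySem.List.pyRange 0 (N : Int) 1).map
        (fun r => ((PySem.List.pyRange 0 (r + 1) 1).map (fun l => w l r)).sum)).sum
      = ((PySem.List.pyRange 0 (N : Int) 1).map
        (fun i => ((PySem.List.pyRange i (N : Int) 1).map (fun j => w i j)).sum)).sum := by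
  intro N
  induction N with
  | zero => simp [PySem.List.pyRange_one_eq_nil (le_refl (0 : Int))]
  | succ N ih =>
    have hcast : ((N + 1 : Nat) : Int) = (N : Int) + 1 := by push_cast; ring
    rw [hcast, PySem.List.pyRange_one_succ_right (by omega : (0:Int) ≤ (N : Int))]
    simp only [List.map_append, List.sum_append, List.map_cons, List.map_nil,
      List.sum_cons, List.sum_nil]
    rw [ih]
    -- RHS inner sums now run to N+1; peel the last column off each
    have hinner : (PySem.List.pyRange 0 (N : Int) 1).map
          (fun i => ((PySem.List.pyRange i ((N : Int) + 1) 1).map (fun j => w i j)).sum)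
        = (PySem.List.pyRange 0 (N : Int) 1).map
          (fun i => ((PySem.List.pyRange i (N : Int) 1).map (fun j => w i j)).sum + w i (N : Int)) := by
      apply List.map_congr_left
      intro i hi
      have hib := PySem.List.mem_pyRange_one.mp hi
      rw [PySem.List.pyRange_one_succ_right (by omega : i ≤ (N : Int))]
      simp
    rw [hinner, PySem.List.sum_map_add_int]
    have hlast : ((PySem.List.pyRange (N : Int) ((N : Int) + 1) 1).map (fun j => w (N : Int) j)).sum
        = w (N : Int) (N : Int) := by
      rw [PySem.List.pyRange_one_singleton]
      simp
    have hrow : ((PySem.List.pyRange 0 ((N : Int) + 1) 1).map (fun l => w l (N : Int))).sum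
        = ((PySem.List.pyRange 0 (N : Int) 1).map (fun l => w l (N : Int))).sum
          + w (N : Int) (N : Int) := by
      rw [PySem.List.pyRange_one_succ_right (by omega : (0:Int) ≤ (N : Int))]
      simp
    rw [hlast, hrow]
    ring


theorem inner_spec (nums : List Int) (i : Int) :
    ∀ (c : Nat) (acc : Int),
      (PySem.List.pyRange (i + 1) (i + 1 + (c : Int)) 1).foldl
        (fun (s : Int × Int × Int) (j : Int) =>
          (max s.1 (PySem.List.pyGetD nums j 0), min s.2.1 (PySem.List.pyGetD nums j 0),
           s.2.2 + (max s.1 (PySem.List.pyGetD nums j 0) - min s.2.1 (PySem.List.pyGetD nums j 0))))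
        (pvV nums i, pvV nums i, acc)
      = (sMaxV (pvV nums) i (i + (c : Int)), sMinV (pvV nums) i (i + (c : Int)),
         acc + ((PySem.List.pyRange (i + 1) (i + 1 + (c : Int)) 1).map
            (fun j => sMaxV (pvV nums) i j - sMinV (pvV nums) i j)).sum) := by
  intro c
  induction c with
  | zero =>
    intro acc
    rw [show ((0 : Nat) : Int) = 0 from rfl]
    rw [PySem.List.pyRange_one_eq_nil (by omega : i + 1 + 0 ≤ i + 1)]
    simp [sMaxV_self, sMinV_self]
  | succ c ih =>
    intro acc
    have hb : i + 1 + ((c + 1 : Nat) : Int) = (i + 1 + (c : Int)) + 1 := by push_cast; ring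
    have hy : i + ((c + 1 : Nat) : Int) = (i + (c : Int)) + 1 := by push_cast; ring
    rw [hb, hy, PySem.List.pyRange_one_succ_right (by omega : i + 1 ≤ i + 1 + (c : Int)),
        List.foldl_append, List.map_append, List.sum_append, ih acc]
    have hx : i + 1 + (c : Int) = (i + (c : Int)) + 1 := by ring
    have hic : i ≤ i + (c : Int) := by omega
    simp only [List.foldl_cons, List.foldl_nil, List.map_cons, List.map_nil,
      List.sum_cons, List.sum_nil]
    rw [hx, sMaxV_succ (pvV nums) hic, sMinV_succ (pvV nums) hic]
    have hv : PySem.List.pyGetD nums ((i + (c : Int)) + 1) 0 = pvV nums ((i + (c : Int)) + 1) := rfl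
    simp only [hv, Prod.mk.injEq]
    and_intros <;> first | trivial | ring

theorem alt_val (nums : List Int) :
    sumSubseqWidths_alt nums
      = PySem.Int.mod
          (((PySem.List.pyRange 0 ((nums.length : Nat) : Int) 1).map
            (fun i => ((PySem.List.pyRange (i + 1) ((nums.length : Nat) : Int) 1).map
              (fun j => sMaxV (pvV nums) i j - sMinV (pvV nums) i j)).sum)).sum)
          (10 ^ 9 + 7) := by
  unfold sumSubseqWidths_alt
  simp only [PySem.List.len_eq]
  have hstep : ∀ (acc x : Int), x ∈ PySem.List.pyRange 0 ((nums.length : Nat) : Int) 1 →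
      (fun (acc : Int) (i : Int) =>
        ((PySem.List.pyRange (i + 1) ((nums.length : Nat) : Int) 1).foldl
          (fun (s : Int × Int × Int) (j : Int) =>
            (max s.1 (PySem.List.pyGetD nums j 0), min s.2.1 (PySem.List.pyGetD nums j 0),
             s.2.2 + (max s.1 (PySem.List.pyGetD nums j 0) - min s.2.1 (PySem.List.pyGetD nums j 0))))
          (PySem.List.pyGetD nums i 0, PySem.List.pyGetD nums i 0, acc)).2.2) acc x
      = acc + ((PySem.List.pyRange (x + 1) ((nums.length : Nat) : Int) 1).map
          (fun j => sMaxV (pvV nums) x j - sMinV (pvV nums) x j)).sum := by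
    intro acc x hx
    have hxb := PySem.List.mem_pyRange_one.mp hx
    obtain ⟨i', hi'⟩ : ∃ i' : Nat, x = (i' : Int) := ⟨x.toNat, by omega⟩
    subst hi'
    have hi'N : i' < nums.length := by exact_mod_cast hxb.2
    have hNc : ((nums.length : Nat) : Int) = (i' : Int) + 1 + ((nums.length - i' - 1 : Nat) : Int) := by
      omega
    rw [hNc]
    beta_reduce
    have hinit : (PySem.List.pyGetD nums (i' : Int) 0, PySem.List.pyGetD nums (i' : Int) 0, acc)
        = (pvV nums (i' : Int), pvV nums (i' : Int), acc) := rfl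
    rw [hinit, inner_spec nums (i' : Int) (nums.length - i' - 1) acc]
  rw [foldl_acc_sum _
      (fun i => ((PySem.List.pyRange (i + 1) ((nums.length : Nat) : Int) 1).map
        (fun j => sMaxV (pvV nums) i j - sMinV (pvV nums) i j)).sum)
      _ hstep 0, zero_add]

theorem a_val (nums : List Int) :
    sumSubseqWidths nums
      = PySem.Int.mod
          (-(SV (fun t => -(pvV nums t)) ((nums.length : Nat) : Int))
            - SV (pvV nums) ((nums.length : Nat) : Int)) 1000000007 := by
  unfold sumSubseqWidths
  rw [PySem.List.enumerate_eq_map_pyRange nums 0]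
  simp only [PySem.List.len_eq]
  rw [fold_split nums, minFold_eq_vLoop nums, maxFold_eq_vLoop nums, List.foldl_map,
      List.foldl_map, neg_zero]
  rw [show (fun (s : Int × List Int) (j : Int) => vStep (pvV nums) j (j, PySem.List.pyGetD nums j 0).2 s)
        = (fun (s : Int × List Int) (j : Int) => vStep (pvV nums) j (pvV nums j) s) from rfl]
  rw [show (fun (s : Int × List Int) (j : Int) =>
        vStep (fun t => -(pvV nums t)) j (-(j, PySem.List.pyGetD nums j 0).2) s)
        = (fun (s : Int × List Int) (j : Int) =>
            vStep (fun t => -(pvV nums t)) j ((fun t => -(pvV nums t)) j) s) from rfl]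
  have h0min : VInv (pvV nums) 0 (0, []) := by
    refine ⟨trivial, by simp, ?_⟩
    simp [pend, SV, PySem.List.pyRange_one_eq_nil (le_refl (0 : Int))]
  have h0max : VInv (fun t => -(pvV nums t)) 0 (0, []) := by
    refine ⟨trivial, by simp, ?_⟩
    simp [pend, SV, PySem.List.pyRange_one_eq_nil (le_refl (0 : Int))]
  have hmin := vLoop_inv (pvV nums) nums.length 0 (0, []) h0min
  have hmax := vLoop_inv (fun t => -(pvV nums t)) nums.length 0 (0, []) h0max
  simp only [Nat.cast_zero, zero_add] at hmin hmax
  obtain ⟨_, _, hAccMin⟩ := hmin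
  obtain ⟨_, _, hAccMax⟩ := hmax
  rw [pvFlushMin_eq_vFlush, vFlush_pend, pvFlushMax_eq_vFlush, vFlush_pend, neg_neg]
  rw [hAccMin, hAccMax]

theorem bridge (nums : List Int) :
    -(SV (fun t => -(pvV nums t)) ((nums.length : Nat) : Int))
      - SV (pvV nums) ((nums.length : Nat) : Int)
    = ((PySem.List.pyRange 0 ((nums.length : Nat) : Int) 1).map
        (fun i => ((PySem.List.pyRange (i + 1) ((nums.length : Nat) : Int) 1).map
          (fun j => sMaxV (pvV nums) i j - sMinV (pvV nums) i j)).sum)).sum := by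
  have hrow : ∀ r : Int, rowV (fun t => -(pvV nums t)) r
      = -(((PySem.List.pyRange 0 (r + 1) 1).map (fun l => sMaxV (pvV nums) l r)).sum) := by
    intro r
    unfold rowV
    rw [List.map_congr_left (fun l _ => sMinV_neg (pvV nums) l r), sum_map_neg_int]
  have h1 : SV (fun t => -(pvV nums t)) ((nums.length : Nat) : Int)
      = -(((PySem.List.pyRange 0 ((nums.length : Nat) : Int) 1).map
          (fun r => ((PySem.List.pyRange 0 (r + 1) 1).map (fun l => sMaxV (pvV nums) l r)).sum)).sum) := by
    unfold SV
    rw [List.map_congr_left (fun r _ => hrow r),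
        sum_map_neg_int _ (fun r => ((PySem.List.pyRange 0 (r + 1) 1).map
          (fun l => sMaxV (pvV nums) l r)).sum)]
  have h2 : SV (pvV nums) ((nums.length : Nat) : Int)
      = ((PySem.List.pyRange 0 ((nums.length : Nat) : Int) 1).map
          (fun r => ((PySem.List.pyRange 0 (r + 1) 1).map (fun l => sMinV (pvV nums) l r)).sum)).sum := rfl
  rw [h1, h2, neg_neg]
  have h3 : ((PySem.List.pyRange 0 ((nums.length : Nat) : Int) 1).map
        (fun r => ((PySem.List.pyRange 0 (r + 1) 1).map
          (fun l => sMaxV (pvV nums) l r - sMinV (pvV nums) l r)).sum)).sum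
      = ((PySem.List.pyRange 0 ((nums.length : Nat) : Int) 1).map
          (fun r => ((PySem.List.pyRange 0 (r + 1) 1).map (fun l => sMaxV (pvV nums) l r)).sum
            - ((PySem.List.pyRange 0 (r + 1) 1).map (fun l => sMinV (pvV nums) l r)).sum)).sum := by
    rw [List.map_congr_left (fun r _ => sum_map_sub_int _ _ _)]
  rw [← sum_map_sub_int, ← h3, exch (fun l r => sMaxV (pvV nums) l r - sMinV (pvV nums) l r) nums.length]
  apply congrArg List.sum
  apply List.map_congr_left
  intro i hi
  have hib := PySem.List.mem_pyRange_one.mp hi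
  rw [PySem.List.pyRange_one_cons (by omega : i < ((nums.length : Nat) : Int))]
  simp [sMaxV_self, sMinV_self]


-- ===== VERDICT (by name: the statement is the Claim_ definition above) =====
theorem sumSubseqWidths_spec : Claim_equal_sumSubseqWidths := by
  intro nums _
  show sumSubseqWidths nums = sumSubseqWidths_alt nums
  rw [a_val, alt_val, bridge]
  norm_num
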